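-- pv_equiv track=rewrite | github.com/simonkim1/Programmers | Level 0/Python/배열 만들기 4.py | solution
-- ===== SOURCE A (Python) =====
-- def solution(arr):
--     stk = []
--     i = 0
--
--     while len(arr) > i:
--         if i < len(arr):
--             if not stk:
--                 stk.append(arr[i])
--                 i += 1
--             elif len(stk) > 0 and stk[-1] < arr[i]:
--                 stk.append(arr[i])
--                 i += 1
--             elif len(stk) > 0 and stk[-1] >= arr[i]:
--                 del stk[-1]
--
--     return stk
-- ===== SOURCE B (Python) =====
-- def solution(arr):
--     # keep arr[i] iff it is strictly smaller than every later element: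
--     # one backward pass maintaining the running suffix minimum; no stack.
--     res = []
--     m = None
--     for x in reversed(arr):
--         if m is None or x < m:
--             res.append(x)
--             m = x
--     return res[::-1]
-- ===== Notes on version B (the rewrite author's own statement) =====
-- stated objective: alternative
-- what changed: Replaced A's stack machine (flat while loop that pushes or pops a stack via an explicit index) with a stackless backward pass: an element is kept iff it is strictly below the running suffix minimum, collecting kept elements in reverse and reversing once at the end.
import Mathlib
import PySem

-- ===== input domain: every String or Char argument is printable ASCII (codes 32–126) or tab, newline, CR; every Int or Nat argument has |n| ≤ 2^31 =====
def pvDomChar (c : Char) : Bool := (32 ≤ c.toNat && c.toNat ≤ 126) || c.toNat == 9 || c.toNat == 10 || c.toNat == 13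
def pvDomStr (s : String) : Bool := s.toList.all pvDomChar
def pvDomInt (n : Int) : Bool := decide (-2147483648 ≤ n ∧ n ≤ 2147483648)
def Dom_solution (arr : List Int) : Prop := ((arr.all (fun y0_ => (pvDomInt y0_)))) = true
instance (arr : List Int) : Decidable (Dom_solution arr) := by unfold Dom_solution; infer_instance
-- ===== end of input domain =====

-- ===== PORT A =====
-- A: flat while-loop over an index i; each step either pushes arr[i] and advances, or pops.
-- transliteration of A's while loop; stk[-1] = getLast!, del stk[-1] = dropLast, append = ++ [·]
def solutionLoop (arr : List Int) (stk : List Int) (i : Nat) : List Int :=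
  if h : arr.length > i then
    if i < arr.length then
      if stk = [] then
        solutionLoop arr (stk ++ [arr[i]]) (i + 1)
      else if stk.length > 0 ∧ stk.getLast! < arr[i] then
        solutionLoop arr (stk ++ [arr[i]]) (i + 1)
      else if stk.length > 0 ∧ stk.getLast! ≥ arr[i] then
        solutionLoop arr stk.dropLast i
      else stk
    else stk
  else stk
termination_by 2 * (arr.length - i) + stk.length
decreasing_by
  · simp; omega
  · simp; omega
  · rename_i hne _ hc
    have : stk.length > 0 := by cases stk <;> simp_all
    simp [List.length_dropLast]; omega

def solution (arr : List Int) : List Int := solutionLoop arr [] 0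

-- ===== PORT B =====
-- B: no stack at all — one backward pass keeping each element that is strictly
-- below the running suffix minimum, then reverse the collected list (same O(n) cost).
-- state = (res, m): res grows by append (python list.append), m is the running minimum
def altStep (st : List Int × Option Int) (x : Int) : List Int × Option Int :=
  match st.2 with
  | none => (st.1 ++ [x], some x)
  | some m => if x < m then (st.1 ++ [x], some x) else st

def solution_alt (arr : List Int) : List Int :=
  (arr.reverse.foldl altStep ([], none)).1.reverse

-- ===== PRECONDITION & SPEC =====
def Spec_solution (arr : List Int) (out : List Int) : Prop := out = solution_alt arr
instance (arr : List Int) (out : List Int) : Decidable (Spec_solution arr out) := by unfold Spec_solution; infer_instance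

-- ===== CLAIM (what is proved, stated in full; the proofs are below) =====
def Claim_equal_solution : Prop := ∀ (arr : List Int), Dom_solution arr → Spec_solution arr (solution arr)

-- ===== LEMMAS AND PROOFS =====

-- inner pop loop semantics of A's deletes, used to characterise solutionLoop
def popGE (stk : List Int) (x : Int) : List Int :=
  if _h : stk ≠ [] ∧ stk.getLast! ≥ x then popGE stk.dropLast x else stk
termination_by stk.length
decreasing_by
  simp [List.length_dropLast]; cases stk <;> simp_all

theorem loop_eq_foldl (arr stk : List Int) (i : Nat) :
    solutionLoop arr stk i =
      (arr.drop i).foldl (fun s x => popGE s x ++ [x]) stk := by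
  fun_induction solutionLoop arr stk i with
  | case1 i h1 h2 ih =>
    rw [ih, List.drop_eq_getElem_cons (by omega : i < arr.length)]
    rw [List.foldl_cons, popGE]
    simp
  | case2 stk i h1 h2 hnil hlt ih =>
    rw [ih, List.drop_eq_getElem_cons (by omega : i < arr.length)]
    rw [List.foldl_cons, popGE]
    simp only [List.getLast!_eq_getLast?_getD, Int.default_eq_zero] at hlt
    simp [not_le.mpr hlt.2]
  | case3 stk i h1 h2 hnil hlt hge ih =>
    rw [ih]
    have hd : arr.drop i = arr[i] :: arr.drop (i+1) := List.drop_eq_getElem_cons (by omega)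
    have hstep : popGE stk arr[i] = popGE stk.dropLast arr[i] := by
      rw [popGE]
      simp only [List.getLast!_eq_getLast?_getD, Int.default_eq_zero] at hge
      simp [hnil, hge.2]
    rw [hd, List.foldl_cons, List.foldl_cons, hstep]
  | case4 stk i h1 h2 hnil hlt hge =>
    exfalso
    have : 0 < stk.length := List.length_pos_of_ne_nil hnil
    rcases lt_or_ge stk.getLast! arr[i] with hc | hc
    · exact hlt ⟨this, hc⟩
    · exact hge ⟨this, hc⟩
  | case5 stk i h1 h2 => omega
  | case6 stk i h1 =>
    rw [List.drop_eq_nil_of_le (show arr.length ≤ i by omega)]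
    simp

-- the common mathematical value: keep each element strictly smaller than all later ones
def K : List Int → List Int
  | [] => []
  | x :: t => if ∀ y ∈ t, x < y then x :: K t else K t

theorem K_cons (x : Int) (t : List Int) :
    K (x :: t) = if ∀ y ∈ t, x < y then x :: K t else K t := rfl

theorem K_sublist (t : List Int) : (K t).Sublist t := by
  induction t with
  | nil => simp [K]
  | cons x t ih =>
    unfold K
    split
    · exact ih.cons₂ x
    · exact ih.cons x

theorem K_pairwise (t : List Int) : (K t).Pairwise (· < ·) := by
  induction t with
  | nil => simp [K]
  | cons x t ih =>
    unfold K
    split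
    · rename_i h
      exact List.pairwise_cons.mpr ⟨fun y hy => h y ((K_sublist t).mem hy), ih⟩
    · exact ih

theorem K_append (t : List Int) (x : Int) :
    K (t ++ [x]) = (K t).filter (fun y => decide (y < x)) ++ [x] := by
  induction t with
  | nil => simp [K]
  | cons a t ih =>
    show K (a :: (t ++ [x])) = _
    unfold K
    by_cases hall : ∀ y ∈ t, a < y
    · by_cases hax : a < x
      · have hall' : ∀ y ∈ t ++ [x], a < y := by
          intro y hy; rcases List.mem_append.mp hy with h | h
          · exact hall y h
          · simp at h; omega
        rw [if_pos hall', if_pos hall, ih]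
        simp [hax]
      · have hnall' : ¬ ∀ y ∈ t ++ [x], a < y := by
          intro h; exact hax (h x (by simp))
        rw [if_neg hnall', if_pos hall, ih]
        simp [hax]
    · have hnall' : ¬ ∀ y ∈ t ++ [x], a < y := by
        intro h; exact hall (fun y hy => h y (List.mem_append.mpr (Or.inl hy)))
      rw [if_neg hnall', if_neg hall, ih]

-- popping all tail elements ≥ x from a strictly increasing list = filtering (< x)
theorem popGE_filter (l : List Int) (x : Int) (hp : l.Pairwise (· < ·)) :
    popGE l x = l.filter (fun y => decide (y < x)) := by
  fun_induction popGE l x with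
  | case1 l h ih =>
    obtain ⟨hne, hge⟩ := h
    have hl : l = l.dropLast ++ [l.getLast hne] := (List.dropLast_append_getLast hne).symm
    have hlast : l.getLast! = l.getLast hne := by
      simp [List.getLast!_eq_getLast?_getD, List.getLast?_eq_getLast_of_ne_nil hne]
    rw [ih (hp.sublist (List.dropLast_sublist l))]
    conv_rhs => rw [hl]
    rw [List.filter_append]
    have : ¬ (l.getLast hne < x) := by rw [hlast] at hge; omega
    simp [this]
  | case2 l h =>
    rcases eq_or_ne l [] with rfl | hne
    · simp
    · have hlt : l.getLast! < x := by
        rcases not_and_or.mp h with h' | h'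
        · exact absurd hne h'
        · omega
      rw [show l.getLast! = l.getLast hne from by
        simp [List.getLast!_eq_getLast?_getD, List.getLast?_eq_getLast_of_ne_nil hne]] at hlt
      have hall : ∀ y ∈ l, y < x := by
        intro y hy
        have hl : l = l.dropLast ++ [l.getLast hne] := (List.dropLast_append_getLast hne).symm
        rcases List.mem_append.mp (hl ▸ hy) with h' | h'
        · have hpp := List.pairwise_append.mp (hl ▸ hp)
          have := hpp.2.2 y h' (l.getLast hne) (by simp)
          omega
        · simp at h'; rw [h']; exact hlt
      rw [List.filter_eq_self.mpr (by intro a ha; simpa using hall a ha)]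

-- A's value is K
theorem foldl_eq_K (arr : List Int) :
    arr.foldl (fun s x => popGE s x ++ [x]) [] = K arr := by
  induction arr using List.reverseRecOn with
  | nil => simp [K]
  | append_singleton t x ih =>
    rw [List.foldl_append, List.foldl_cons, List.foldl_nil, ih,
        popGE_filter _ _ (K_pairwise t), K_append]

-- running suffix minimum
def mo : List Int → Option Int
  | [] => none
  | x :: t => some (match mo t with | none => x | some m => min x m)

theorem mo_none_iff (t : List Int) : mo t = none ↔ t = [] := by
  cases t <;> simp [mo]

theorem mo_le (t : List Int) (v : Int) (h : mo t = some v) : ∀ y ∈ t, v ≤ y := by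
  induction t generalizing v with
  | nil => simp [mo] at h
  | cons a t ih =>
    simp only [mo] at h
    intro y hy
    rcases List.mem_cons.mp hy with rfl | hy'
    · cases hm : mo t <;> rw [hm] at h <;> simp only [Option.some_inj] at h <;> omega
    · cases hm : mo t with
      | none => rw [(mo_none_iff t).mp hm] at hy'; simp at hy'
      | some m =>
        rw [hm] at h
        have := ih m hm y hy'
        simp only [Option.some_inj] at h
        have : min a m ≤ m := min_le_right a m
        omega

theorem mo_mem (t : List Int) (v : Int) (h : mo t = some v) : v ∈ t := by
  induction t generalizing v with
  | nil => simp [mo] at h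
  | cons a t ih =>
    simp only [mo] at h
    cases hm : mo t with
    | none => rw [hm] at h; simp_all
    | some m =>
      rw [hm] at h
      simp only [Option.some_inj] at h
      rcases le_total a m with hle | hle
      · rw [← h, min_eq_left hle]; exact List.mem_cons_self
      · rw [← h, min_eq_right hle]; exact List.mem_cons_of_mem a (ih m hm)

-- B's fold state after consuming the reversed list
theorem altFold_spec (arr : List Int) :
    arr.reverse.foldl altStep ([], none) = ((K arr).reverse, mo arr) := by
  induction arr with
  | nil => simp [K, mo]
  | cons x t ih =>
    rw [List.reverse_cons, List.foldl_append, ih, List.foldl_cons, List.foldl_nil]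
    cases hm : mo t with
    | none =>
      have ht : t = [] := (mo_none_iff t).mp hm
      subst ht
      simp [altStep, K, mo]
    | some m =>
      by_cases hx : x < m
      · have hall : ∀ y ∈ t, x < y := fun y hy => lt_of_lt_of_le hx (mo_le t m hm y hy)
        simp only [altStep, if_pos hx]
        rw [K_cons, if_pos hall]
        simp [mo, hm, min_eq_left (le_of_lt hx)]
      · have hnall : ¬ ∀ y ∈ t, x < y := by
          intro h; exact hx (h m (mo_mem t m hm))
        simp only [altStep, if_neg hx]
        rw [K_cons, if_neg hnall]
        simp [mo, hm, min_eq_right (by omega : m ≤ x)]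

-- ===== VERDICT (by name: the statement is the Claim_ definition above) =====
theorem solution_spec : Claim_equal_solution := by
  intro arr _
  unfold Spec_solution solution solution_alt
  rw [altFold_spec, loop_eq_foldl, List.drop_zero, foldl_eq_K]
  simp
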